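-- pv_equiv track=rewrite | github.com/jyajoo/Problem-Solving | Programmers/Hash/42578.py | solution
-- ===== SOURCE A (Python) =====
-- from itertools import combinations
-- from math import prod
--
-- def solution(clothes):
--     answer = 0
--     wear = {}
--     for i, j in clothes:
--         if j not in wear:
--             wear[j] = 1
--         else:
--             wear[j] += 1
--     wear = list(wear.values())
--     for i in range(1, len(wear) + 1):
--         for j in combinations(wear, i):
--             answer += prod(j)
--     return answer
-- ===== SOURCE B (Python) =====
-- from math import prod
--
-- def solution(clothes):
--     counts = {}
--     for _, kind in clothes:
--         counts[kind] = counts.get(kind, 0) + 1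
--     return prod(c + 1 for c in counts.values()) - 1
-- ===== Notes on version B (the rewrite author's own statement) =====
-- stated objective: faster
-- what changed: Replaces the exponential enumeration of all non-empty combinations of category counts by the closed form prod(count+1) over categories minus 1.
import Mathlib
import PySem

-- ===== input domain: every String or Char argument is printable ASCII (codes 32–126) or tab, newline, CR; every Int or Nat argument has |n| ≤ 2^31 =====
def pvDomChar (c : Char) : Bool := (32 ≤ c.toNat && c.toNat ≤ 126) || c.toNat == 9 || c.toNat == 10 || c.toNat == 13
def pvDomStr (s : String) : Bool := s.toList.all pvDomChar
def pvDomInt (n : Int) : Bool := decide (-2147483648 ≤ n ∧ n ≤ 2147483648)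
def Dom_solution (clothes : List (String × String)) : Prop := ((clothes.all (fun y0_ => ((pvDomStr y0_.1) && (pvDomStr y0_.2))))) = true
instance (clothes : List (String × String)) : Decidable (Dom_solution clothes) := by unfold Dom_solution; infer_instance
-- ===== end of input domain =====

-- B replaces A's exponential enumeration of all non-empty combinations of category
-- counts by the closed form: product of (count + 1) over categories, minus 1.

-- ===== PORT A =====
-- itertools.combinations over a list, yielding subsequences of the given size in order
def combosA : Nat → List Int → List (List Int)
  | 0, _ => [[]]
  | _ + 1, [] => []
  | n + 1, x :: xs => (combosA n xs).map (fun c => x :: c) ++ combosA (n + 1) xs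

def solution (clothes : List (String × String)) : Int :=
  let wear : PySem.Dict String Int :=
    clothes.foldl
      (fun d ij =>
        if d.contains ij.2 = false then d.insert ij.2 1
        else d.insert ij.2 (d.getD ij.2 0 + 1))
      PySem.Dict.empty
  let wearV := wear.values
  (PySem.List.pyRange 1 ((wearV.length : Int) + 1) 1).foldl
    (fun answer i =>
      (combosA i.toNat wearV).foldl (fun a c => a + c.foldl (· * ·) 1) answer)
    0

-- ===== PORT B =====
def solution_alt (clothes : List (String × String)) : Int :=
  let counts : PySem.Dict String Int :=
    clothes.foldl (fun d ij => d.insert ij.2 (d.getD ij.2 0 + 1)) PySem.Dict.empty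
  counts.values.foldl (fun a c => a * (c + 1)) 1 - 1

-- ===== PRECONDITION & SPEC =====
def Spec_solution (clothes : List (String × String)) (out : Int) : Prop := out = solution_alt clothes
instance (clothes : List (String × String)) (out : Int) : Decidable (Spec_solution clothes out) := by unfold Spec_solution; infer_instance

-- ===== CLAIM (what is proved, stated in full; the proofs are below) =====
def Claim_equal_solution : Prop := ∀ (clothes : List (String × String)), Dom_solution clothes → Spec_solution clothes (solution clothes)

-- ===== LEMMAS AND PROOFS =====

-- the two counting loops build the same dict
theorem dict_step_eq :
    (fun (d : PySem.Dict String Int) (ij : String × String) =>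
        if d.contains ij.2 = false then d.insert ij.2 1
        else d.insert ij.2 (d.getD ij.2 0 + 1)) =
    (fun (d : PySem.Dict String Int) (ij : String × String) =>
        d.insert ij.2 (d.getD ij.2 0 + 1)) := by
  funext d ij
  by_cases h : d.contains ij.2 = false
  · simp [h, PySem.Dict.getD_of_not_contains]
  · simp [h]

theorem foldl_mul (l : List Int) (a : Int) : l.foldl (· * ·) a = a * l.prod := by
  induction l generalizing a with
  | nil => simp
  | cons x xs ih => simp [List.foldl_cons, ih, mul_assoc]

-- sum of products of all size-i combinations
def fS (i : Nat) (L : List Int) : Int := ((combosA i L).map (fun c => c.prod)).sum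

theorem fS_zero (L : List Int) : fS 0 L = 1 := by simp [fS, combosA]

theorem fS_succ_nil (i : Nat) : fS (i + 1) [] = 0 := by simp [fS, combosA]

theorem fS_succ_cons (i : Nat) (x : Int) (xs : List Int) :
    fS (i + 1) (x :: xs) = x * fS i xs + fS (i + 1) xs := by
  simp [fS, combosA, Function.comp_def, List.sum_map_mul_left]

theorem sumF (L : List Int) : ∀ k, L.length ≤ k →
    (∑ i ∈ Finset.range (k + 1), fS i L) = (L.map (fun c => c + 1)).prod := by
  induction L with
  | nil =>
      intro k _
      rw [Finset.sum_range_succ']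
      simp [fS_zero, fS_succ_nil]
  | cons x xs ih =>
      intro k hk
      simp only [List.length_cons] at hk
      obtain ⟨m, rfl⟩ : ∃ m, k = m + 1 := ⟨k - 1, by omega⟩
      have hm : xs.length ≤ m := by omega
      have h1 : (∑ i ∈ Finset.range (m + 1), fS i xs) = (xs.map (fun c => c + 1)).prod :=
        ih m hm
      have h2 : (∑ i ∈ Finset.range (m + 2), fS i xs) = (xs.map (fun c => c + 1)).prod :=
        ih (m + 1) (by omega)
      rw [Finset.sum_range_succ']
      have hstep : (∑ i ∈ Finset.range (m + 1), fS (i + 1) (x :: xs)) =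
          x * (∑ i ∈ Finset.range (m + 1), fS i xs) +
          (∑ i ∈ Finset.range (m + 1), fS (i + 1) xs) := by
        simp only [fS_succ_cons, Finset.sum_add_distrib, Finset.mul_sum]
      have h3 : (∑ i ∈ Finset.range (m + 1), fS (i + 1) xs) =
          (∑ i ∈ Finset.range (m + 2), fS i xs) - fS 0 xs := by
        rw [Finset.sum_range_succ' (fun i => fS i xs) (m + 1)]; ring
      rw [hstep, h1, h3, h2, fS_zero, fS_zero]
      simp [List.prod_cons]
      ring

theorem sum_range_list (g : Nat → Int) (n : Nat) :
    ((List.range n).map g).sum = ∑ i ∈ Finset.range n, g i := by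
  induction n with
  | zero => simp
  | succ n ih => rw [List.range_succ, Finset.sum_range_succ]; simp [ih]

-- the double loop of A over a values list equals the closed form minus 1
theorem loops_eq_closed (V : List Int) :
    (PySem.List.pyRange 1 ((V.length : Int) + 1) 1).foldl
      (fun answer i =>
        (combosA i.toNat V).foldl (fun a c => a + c.foldl (· * ·) 1) answer) 0 =
    (V.map (fun c => c + 1)).prod - 1 := by
  have hinner : ∀ (ans : Int) (i : Int),
      (combosA i.toNat V).foldl (fun a c => a + c.foldl (· * ·) 1) ans =
      ans + fS i.toNat V := by
    intro ans i
    rw [PySem.List.foldl_add]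
    unfold fS
    congr 1
    refine congrArg (List.sum : List Int → Int) ?_
    apply List.map_congr_left
    intro c _
    rw [foldl_mul, one_mul]
  calc
    (PySem.List.pyRange 1 ((V.length : Int) + 1) 1).foldl
        (fun answer i =>
          (combosA i.toNat V).foldl (fun a c => a + c.foldl (· * ·) 1) answer) 0
      = (PySem.List.pyRange 1 ((V.length : Int) + 1) 1).foldl
          (fun answer i => answer + fS i.toNat V) 0 := by
        apply PySem.List.foldl_congr_mem
        intro acc x _
        exact hinner acc x
    _ = ((PySem.List.pyRange 1 ((V.length : Int) + 1) 1).map (fun i => fS i.toNat V)).sum := by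
        rw [PySem.List.foldl_add]; simp
    _ = ((List.range V.length).map (fun k => fS (k + 1) V)).sum := by
        rw [PySem.List.pyRange_one]
        have hlen : (((V.length : Int) + 1 - 1)).toNat = V.length := by omega
        rw [hlen, List.map_map]
        refine congrArg (List.sum : List Int → Int) ?_
        apply List.map_congr_left
        intro k _
        simp only [Function.comp_apply]
        congr 1
        omega
    _ = ∑ k ∈ Finset.range V.length, fS (k + 1) V := sum_range_list _ _
    _ = (∑ i ∈ Finset.range (V.length + 1), fS i V) - fS 0 V := by
        rw [Finset.sum_range_succ' (fun i => fS i V) V.length]; ring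
    _ = (V.map (fun c => c + 1)).prod - 1 := by
        rw [sumF V V.length le_rfl, fS_zero]

theorem foldl_mul_succ (l : List Int) (a : Int) :
    l.foldl (fun a c => a * (c + 1)) a = a * (l.map (fun c => c + 1)).prod := by
  induction l generalizing a with
  | nil => simp
  | cons x xs ih => simp [List.foldl_cons, ih, mul_assoc]

-- ===== VERDICT (by name: the statement is the Claim_ definition above) =====
theorem solution_spec : Claim_equal_solution := by
  intro clothes _
  unfold Spec_solution solution solution_alt
  rw [dict_step_eq]
  rw [loops_eq_closed]
  simp only [foldl_mul_succ, one_mul]
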